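-- pv_equiv track=rewrite | github.com/MarcinGladkowski/advent_of_code_2023 | day_9/main.py | extrapolate_map_from_begging
-- ===== SOURCE A (Python) =====
-- def extrapolate_map_from_begging(generated_map: list) -> list:
--     for i in reversed(range(0, len(generated_map))):
--         if i == 0:
--             return generated_map
--
--         if i == len(generated_map) - 1:
--             """Set zero in front of last row"""
--             generated_map[len(generated_map) - 1].insert(0, 0)
--
--         up = generated_map[i - 1]
--         bottom = generated_map[i]
--
--         up, bottom = extrapolate_first_element(up, bottom)
--
--         generated_map[i - 1] = up
--         generated_map[i] = bottom
--
--     return generated_map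
--
-- def get_extrapolate_for_first_value(bottom: list, up: list):
--     return up[0] - bottom[0]
--
-- def add_extrapolate_on_first_index(value: int, up: list):
--     up.insert(0, value)
--     return up
--
-- def extrapolate_first_element(up: list, bottom: list) -> tuple:
--     value = get_extrapolate_for_first_value(bottom, up)
--     add_extrapolate_on_first_index(value, up)
--     return up, bottom
-- ===== SOURCE B (Python) =====
-- def extrapolate_map_from_begging(generated_map: list) -> list:
--     if len(generated_map) < 2:
--         return generated_map
--     acc = 0
--     vals = [0]
--     for row in reversed(generated_map[:-1]):
--         acc = row[0] - acc
--         vals.append(acc)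
--     vals.reverse()
--     return [[v] + row for v, row in zip(vals, generated_map)]
-- ===== Notes on version B (the rewrite author's own statement) =====
-- stated objective: simpler
-- what changed: Replaces A's in-place index loop with helper-tuple shuffling by one accumulator pass that collects the new first values bottom-up and then rebuilds the rows with zip; no mutation of the argument (A mutates its rows in place, the claim is about the return value).
import Mathlib
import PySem

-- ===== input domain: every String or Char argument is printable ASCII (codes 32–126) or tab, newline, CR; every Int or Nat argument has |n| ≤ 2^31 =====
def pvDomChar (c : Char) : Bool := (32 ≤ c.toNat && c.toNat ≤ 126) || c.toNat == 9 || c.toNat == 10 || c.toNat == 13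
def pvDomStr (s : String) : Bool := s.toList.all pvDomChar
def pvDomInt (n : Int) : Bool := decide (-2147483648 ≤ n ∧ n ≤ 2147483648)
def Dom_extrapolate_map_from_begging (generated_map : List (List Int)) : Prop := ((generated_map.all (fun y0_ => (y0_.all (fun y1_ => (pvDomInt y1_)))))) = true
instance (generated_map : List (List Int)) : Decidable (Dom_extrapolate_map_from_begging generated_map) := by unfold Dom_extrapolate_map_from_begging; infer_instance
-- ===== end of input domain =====

-- B is a non-mutating accumulator rewrite; A mutates its argument's rows in place, so the
-- equivalence proved here is about the RETURN value only.

-- ===== PORT A =====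
-- the for-loop 'for i in reversed(range(0, len(gm)))' with its early return at i == 0,
-- as a countdown recursion on i; list mutation ported as List.set
def aLoop (gm : List (List Int)) (i : Nat) : List (List Int) :=
  if i = 0 then gm
  else
    let n := gm.length
    -- generated_map[len-1].insert(0, 0)
    let gm1 := if i = n - 1 then gm.set (n - 1) (0 :: ((PySem.List.pyGet? gm ((n : Int) - 1)).getD [])) else gm
    let up := (PySem.List.pyGet? gm1 ((i : Int) - 1)).getD []
    let bottom := (PySem.List.pyGet? gm1 (i : Int)).getD []
    -- extrapolate_first_element: value = up[0] - bottom[0]; up.insert(0, value)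
    let value := (PySem.List.pyGet? up 0).getD 0 - (PySem.List.pyGet? bottom 0).getD 0
    let up' := value :: up
    let gm2 := (gm1.set (i - 1) up').set i bottom
    aLoop gm2 (i - 1)

def extrapolate_map_from_begging (generated_map : List (List Int)) : List (List Int) :=
  aLoop generated_map (generated_map.length - 1)

-- ===== PORT B =====
def extrapolate_map_from_begging_alt (generated_map : List (List Int)) : List (List Int) :=
  if generated_map.length < 2 then generated_map
  else
    let st := ((PySem.List.slice generated_map none (some (-1))).reverse).foldl
      (fun (st : Int × List Int) row =>
        let acc := (PySem.List.pyGet? row 0).getD 0 - st.1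
        (acc, st.2 ++ [acc])) ((0 : Int), [(0 : Int)])
    List.zipWith (fun v row => v :: row) st.2.reverse generated_map

-- ===== PRECONDITION & SPEC =====
-- Pre_ excludes exactly the inputs where Python A raises (IndexError: 'up[0]' on an empty
-- row among all but the last, when there are at least two rows); Python B raises there too.
def Pre_extrapolate_map_from_begging (generated_map : List (List Int)) : Prop :=
  generated_map.length < 2 ∨ ∀ row ∈ generated_map.dropLast, row ≠ []
instance (generated_map : List (List Int)) : Decidable (Pre_extrapolate_map_from_begging generated_map) := by unfold Pre_extrapolate_map_from_begging; infer_instance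
def pvWitness_extrapolate_map_from_begging : List (List Int) := [[1, 3], [2]]

def Spec_extrapolate_map_from_begging (generated_map : List (List Int)) (out : List (List Int)) : Prop := out = extrapolate_map_from_begging_alt generated_map
instance (generated_map : List (List Int)) (out : List (List Int)) : Decidable (Spec_extrapolate_map_from_begging generated_map out) := by unfold Spec_extrapolate_map_from_begging; infer_instance

-- ===== CLAIM (what is proved, stated in full; the proofs are below) =====
def Claim_equal_extrapolate_map_from_begging : Prop := ∀ (generated_map : List (List Int)), Dom_extrapolate_map_from_begging generated_map → Pre_extrapolate_map_from_begging generated_map → Spec_extrapolate_map_from_begging generated_map (extrapolate_map_from_begging generated_map)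

-- ===== LEMMAS AND PROOFS =====

-- first element of a row as both programs read it
def hd0 (r : List Int) : Int := (PySem.List.pyGet? r 0).getD 0

-- the new first value of each row: 0 for the last row, row[0] - value-below otherwise
def valsOf : List (List Int) → List Int
  | [] => []
  | [_] => [0]
  | r :: s :: t => (hd0 r - ((valsOf (s :: t)).headD 0)) :: valsOf (s :: t)

-- the common normal form both ports reach
def Z (rs : List (List Int)) : List (List Int) :=
  List.zipWith (fun v row => v :: row) (valsOf rs) rs

theorem valsOf_length (rs : List (List Int)) : (valsOf rs).length = rs.length := by
  induction rs with
  | nil => rfl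
  | cons r t ih =>
    cases t with
    | nil => rfl
    | cons s u => simp [valsOf] at ih ⊢; omega

theorem Z_length (rs : List (List Int)) : (Z rs).length = rs.length := by
  simp [Z, valsOf_length]

theorem Z_cons (r : List Int) (d : List (List Int)) (hd : d ≠ []) :
    Z (r :: d) = ((hd0 r - (valsOf d).headD 0) :: r) :: Z d := by
  cases d with
  | nil => exact absurd rfl hd
  | cons s t => simp [Z, valsOf]

theorem getLastD_cons' (c a : Int) (l : List Int) :
    (c :: l).getLast?.getD a = l.getLast?.getD c := by
  cases l with
  | nil => simp
  | cons x xs =>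
    rw [List.getLast?_cons_cons]
    rcases h : (x :: xs).getLast? with _ | v
    · simp [List.getLast?_eq_none_iff] at h
    · simp

-- A-side invariant: with at least the last two rows already rewritten (state P ++ Z d)
-- and the loop index at P.length, the loop finishes with Z (P ++ d)
theorem aLoop_inv (P d : List (List Int)) (hd : 2 ≤ d.length) :
    aLoop (P ++ Z d) P.length = Z (P ++ d) := by
  induction P using List.reverseRecOn generalizing d with
  | nil => simp [aLoop]
  | append_singleton Q r ih =>
    obtain ⟨e, d', rfl⟩ : ∃ e d', d = e :: d' := by
      cases d with
      | nil => simp at hd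
      | cons e d' => exact ⟨e, d', rfl⟩
    have hd' : d' ≠ [] := by intro h; rw [h] at hd; simp at hd
    have hzl : (Z (e :: d')).length = d'.length + 1 := by
      rw [Z_length]; rfl
    rw [aLoop]
    have hQr : (Q ++ [r]).length = Q.length + 1 := by simp
    have hst : ((Q ++ [r]) ++ Z (e :: d')).length = Q.length + 2 + d'.length := by
      simp [hzl]; omega
    simp only [hQr, hst]
    rw [if_neg (by omega)]
    rw [if_neg (by
      have : 0 < d'.length := List.length_pos_iff.mpr hd'
      omega)]
    have hZ : Z (e :: d') = ((valsOf (e :: d')).headD 0 :: e) :: List.zipWith (fun v row => v :: row) (valsOf (e :: d')).tail d' := by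
      cases d' with
      | nil => exact absurd rfl hd'
      | cons s t => simp [Z, valsOf]
    set w := (valsOf (e :: d')).headD 0 with hw
    have hup : PySem.List.pyGet? ((Q ++ [r]) ++ Z (e :: d')) ((((Q.length + 1) : Nat) : Int) - 1) = some r := by
      have : (((Q.length + 1 : Nat)) : Int) - 1 = ((Q.length : Nat) : Int) := by push_cast; ring
      rw [this, PySem.List.pyGet?_natCast]
      rw [List.append_assoc]
      simp
    have hbot : PySem.List.pyGet? ((Q ++ [r]) ++ Z (e :: d')) (((Q.length + 1 : Nat)) : Int) = some (w :: e) := by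
      rw [PySem.List.pyGet?_natCast, hZ]
      have h5 : Q.length + 1 = (Q ++ [r]).length := by simp
      rw [h5]
      simp
    rw [hup, hbot]
    simp only [Option.getD_some]
    have hvw : (PySem.List.pyGet? (w :: e) 0).getD 0 = w := by
      simp
    rw [hvw]
    set v := (PySem.List.pyGet? r 0).getD 0 - w with hv
    have hset : (((Q ++ [r]) ++ Z (e :: d')).set (Q.length + 1 - 1) (v :: r)).set (Q.length + 1) (w :: e)
        = Q ++ Z ((r :: e :: d')) := by
      have h1 : Q.length + 1 - 1 = Q.length := by omega
      rw [h1, List.append_assoc, List.set_append_right _ _ (by simp)]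
      have h2 : Q.length - Q.length = 0 := by omega
      simp only [h2]
      rw [List.set_append_right _ _ (by simp)]
      have h3 : Q.length + 1 - Q.length = 1 := by omega
      rw [h3, hZ]
      have hZr : Z (r :: e :: d') = ((hd0 r - w) :: r) :: Z (e :: d') := Z_cons r (e :: d') (by simp)
      rw [hZr, hZ]
      simp [hd0, hv]
    rw [hset]
    have h6 : Q.length + 1 - 1 = Q.length := by omega
    rw [h6]
    have := ih (d := r :: e :: d') (by simp)
    simpa using this

-- the first iteration (i = n-1): inserts 0 in front of the last row and performs one step
theorem aLoop_first (Q : List (List Int)) (p q : List Int) :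
    aLoop (Q ++ [p, q]) ((Q ++ [p, q]).length - 1) = Z (Q ++ [p, q]) := by
  have hlen : (Q ++ [p, q]).length = Q.length + 2 := by simp
  rw [aLoop]
  simp only [hlen]
  rw [if_neg (by omega)]
  simp only [if_true]
  have hlast : PySem.List.pyGet? (Q ++ [p, q]) (((Q.length + 2 : Nat) : Int) - 1) = some q := by
    have : ((Q.length + 2 : Nat) : Int) - 1 = (((Q.length + 1 : Nat)) : Int) := by push_cast; ring
    rw [this, PySem.List.pyGet?_natCast]
    simp
  have h1 : Q.length + 2 - 1 = Q.length + 1 := by omega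
  rw [h1, hlast]
  simp only [Option.getD_some]
  have hset1 : (Q ++ [p, q]).set (Q.length + 1) (0 :: q) = Q ++ [p, 0 :: q] := by
    rw [List.set_append_right _ _ (by simp)]
    have : Q.length + 1 - Q.length = 1 := by omega
    simp [this]
  rw [hset1]
  have hup : PySem.List.pyGet? (Q ++ [p, 0 :: q]) (((Q.length + 1 : Nat) : Int) - 1) = some p := by
    have : ((Q.length + 1 : Nat) : Int) - 1 = ((Q.length : Nat) : Int) := by push_cast; ring
    rw [this, PySem.List.pyGet?_natCast]
    simp
  have hbot : PySem.List.pyGet? (Q ++ [p, 0 :: q]) ((Q.length + 1 : Nat) : Int) = some (0 :: q) := by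
    rw [PySem.List.pyGet?_natCast]
    simp
  rw [hup, hbot]
  simp only [Option.getD_some]
  have hset2 : ((Q ++ [p, 0 :: q]).set (Q.length + 1 - 1)
        (((PySem.List.pyGet? p 0).getD 0 - (PySem.List.pyGet? (0 :: q) 0).getD 0) :: p)).set (Q.length + 1) (0 :: q)
      = Q ++ Z [p, q] := by
    have h2 : Q.length + 1 - 1 = Q.length := by omega
    rw [h2, List.set_append_right _ _ (by simp)]
    have h3 : Q.length - Q.length = 0 := by omega
    simp only [h3, List.set_cons_zero]
    rw [List.set_append_right _ _ (by simp)]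
    have h4 : Q.length + 1 - Q.length = 1 := by omega
    rw [h4]
    simp [Z, valsOf, hd0]
  rw [hset2]
  have := aLoop_inv Q [p, q] (by simp)
  simpa using this

-- characterisation of port A
theorem portA_eq (gm : List (List Int)) :
    extrapolate_map_from_begging gm = if gm.length < 2 then gm else Z gm := by
  by_cases h : gm.length < 2
  · rw [if_pos h]
    unfold extrapolate_map_from_begging
    interval_cases hl : gm.length <;> simp_all [aLoop]
  · rw [if_neg h]
    obtain ⟨Q, p, q, rfl⟩ : ∃ Q p q, gm = Q ++ [p, q] := by
      rcases gm with _ | ⟨a, _ | ⟨b, t⟩⟩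
      · simp at h
      · simp at h
      · clear h
        induction t generalizing a b with
        | nil => exact ⟨[], a, b, rfl⟩
        | cons c t ih =>
          obtain ⟨Q, p, q, hq⟩ := ih b c
          exact ⟨a :: Q, p, q, by simp [hq]⟩
    exact aLoop_first Q p q

-- ===== B side =====

-- what B's fold appends: successive accumulator values over the reversed upper rows
def gAcc (a : Int) : List (List Int) → List Int
  | [] => []
  | r :: rs => (hd0 r - a) :: gAcc (hd0 r - a) rs

theorem fold_gAcc (rs : List (List Int)) (a : Int) (l : List Int) :
    rs.foldl (fun (st : Int × List Int) row =>
        let acc := (PySem.List.pyGet? row 0).getD 0 - st.1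
        (acc, st.2 ++ [acc])) (a, l)
      = ((gAcc a rs).getLastD a, l ++ gAcc a rs) := by
  induction rs generalizing a l with
  | nil => simp [gAcc]
  | cons r rs ih =>
    simp only [List.foldl_cons, gAcc]
    rw [ih]
    simp only [hd0, List.getLastD_eq_getLast?]
    rw [getLastD_cons']
    simp

theorem gAcc_append_single (xs : List (List Int)) (a : Int) (r : List Int) :
    gAcc a (xs ++ [r]) = gAcc a xs ++ [hd0 r - (gAcc a xs).getLastD a] := by
  induction xs generalizing a with
  | nil => simp [gAcc]
  | cons x xs ih =>
    simp only [gAcc, ih, List.getLastD_eq_getLast?, List.cons_append]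
    rw [getLastD_cons']

theorem valsOf_reverse (gm : List (List Int)) (h : gm ≠ []) :
    (valsOf gm).reverse = 0 :: gAcc 0 gm.dropLast.reverse := by
  induction gm with
  | nil => exact absurd rfl h
  | cons r t ih =>
    cases t with
    | nil => simp [valsOf, gAcc]
    | cons s u =>
      have iht := ih (by simp)
      have hdrop : (r :: s :: u).dropLast = r :: (s :: u).dropLast := by
        simp [List.dropLast_cons_of_ne_nil]
      rw [valsOf]
      rw [List.reverse_cons, iht, hdrop, List.reverse_cons, gAcc_append_single]
      have hhead : (valsOf (s :: u)).headD 0 = (gAcc 0 (s :: u).dropLast.reverse).getLastD 0 := by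
        have h2 : valsOf (s :: u) = (0 :: gAcc 0 (s :: u).dropLast.reverse).reverse := by
          rw [← iht, List.reverse_reverse]
        rw [h2]
        simp only [List.headD_eq_head?, List.head?_reverse, List.getLastD_eq_getLast?]
        exact getLastD_cons' 0 0 _
      rw [hhead]
      simp

theorem portB_eq (gm : List (List Int)) (h : ¬ gm.length < 2) :
    extrapolate_map_from_begging_alt gm = Z gm := by
  unfold extrapolate_map_from_begging_alt
  rw [if_neg h]
  simp only [PySem.List.slice_to_neg_one]
  rw [fold_gAcc]
  have hne : gm ≠ [] := by
    intro hnil; rw [hnil] at h; simp at h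
  have : ([(0 : Int)] ++ gAcc 0 gm.dropLast.reverse).reverse = valsOf gm := by
    simp only [List.singleton_append]
    rw [← valsOf_reverse gm hne]
    simp
  simp only [this]
  rfl

-- ===== VERDICT (by name: the statement is the Claim_ definition above) =====
theorem extrapolate_map_from_begging_spec : Claim_equal_extrapolate_map_from_begging := by
  intro gm _ _
  unfold Spec_extrapolate_map_from_begging
  by_cases h : gm.length < 2
  · rw [portA_eq, if_pos h]
    unfold extrapolate_map_from_begging_alt
    rw [if_pos h]
  · rw [portA_eq, if_neg h, portB_eq gm h]
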